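-- pv_equiv track=rewrite | github.com/nguyenhuyenag/algorithms | py-algorithm/number/reverse_factorials.py | reverse_factorial_ok
-- ===== SOURCE A (Python) =====
-- def reverse_factorial_ok(num) -> int:
--     dp = [1]
--     i = 1;
--     while dp[-1] <= num:
--         dp.append(dp[-1] * i)
--         if dp[-1] == num:
--             return f"{i}!"
--         i += 1
--
--     return 'None'
-- ===== SOURCE B (Python) =====
-- def reverse_factorial_ok(num):
--     # Divide num down by successive integers instead of building factorials up.
--     if num < 1:
--         return 'None'
--     i = 1
--     n = num
--     while n > 1:
--         i += 1
--         if n % i != 0: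
--             return 'None'
--         n //= i
--     return f"{i}!"
-- ===== Notes on version B (the rewrite author's own statement) =====
-- stated objective: alternative
-- what changed: B factors num by dividing down through successive integers (2,3,...) with an early 'None' exit at the first non-divisor, instead of A building the list of factorials upward until one reaches or exceeds num.
import Mathlib
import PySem

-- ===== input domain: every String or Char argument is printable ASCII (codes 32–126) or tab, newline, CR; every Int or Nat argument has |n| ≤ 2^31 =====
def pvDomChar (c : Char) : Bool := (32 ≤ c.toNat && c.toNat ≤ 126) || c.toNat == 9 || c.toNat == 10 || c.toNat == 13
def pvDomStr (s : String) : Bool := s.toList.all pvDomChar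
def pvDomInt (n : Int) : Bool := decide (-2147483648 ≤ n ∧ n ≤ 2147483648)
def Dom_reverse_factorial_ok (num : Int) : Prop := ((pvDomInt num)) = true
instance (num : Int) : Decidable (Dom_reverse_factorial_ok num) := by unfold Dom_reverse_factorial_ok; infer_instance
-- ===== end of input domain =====

-- B factors num by dividing down through successive integers instead of A's building factorials upward (alternative algorithm, same asymptotic cost).


-- ===== PORT A =====
-- A's while loop; only dp[-1] is ever read from dp, so the carried state is `last` (= dp[-1]) and i.
-- The Nat fuel only makes the recursion structural; `num.toNat + 2` is never exhausted, since
-- after the first iteration `last` strictly grows and the loop stops once last > num.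
def rfA_loop (num : Int) : Nat → Int → Int → String
  | 0, _, _ => "None"
  | fuel + 1, last, i =>
    if last ≤ num then
      if last * i = num then PySem.Int.toStr i ++ "!"
      else rfA_loop num fuel (last * i) (i + 1)
    else "None"

def reverse_factorial_ok (num : Int) : String :=
  rfA_loop num (num.toNat + 2) 1 1

-- ===== PORT B =====
-- B's while loop over the remaining quotient n and counter i; the Nat fuel `num.toNat + 1`
-- only makes the recursion structural and is never exhausted, since n strictly decreases.
def rfB_loop : Nat → Int → Int → String
  | 0, _, _ => "None"
  | fuel + 1, n, i =>
    if 1 < n then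
      if PySem.Int.mod n (i + 1) ≠ 0 then "None"
      else rfB_loop fuel (PySem.Int.floordiv n (i + 1)) (i + 1)
    else PySem.Int.toStr i ++ "!"

def reverse_factorial_ok_alt (num : Int) : String :=
  if num < 1 then "None"
  else rfB_loop (num.toNat + 1) num 1

-- ===== PRECONDITION & SPEC =====
def Spec_reverse_factorial_ok (num : Int) (out : String) : Prop := out = reverse_factorial_ok_alt num
instance (num : Int) (out : String) : Decidable (Spec_reverse_factorial_ok num out) := by unfold Spec_reverse_factorial_ok; infer_instance

-- ===== CLAIM (what is proved, stated in full; the proofs are below) =====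
def Claim_equal_reverse_factorial_ok : Prop := ∀ (num : Int), Dom_reverse_factorial_ok num → Spec_reverse_factorial_ok num (reverse_factorial_ok num)

-- ===== LEMMAS AND PROOFS =====

-- (k! : Int), the common reference point of both loops
def rfFact (k : Nat) : Int := (Nat.factorial k : Int)

lemma rfFact_pos (k : Nat) : 1 ≤ rfFact k := by
  unfold rfFact; exact_mod_cast Nat.one_le_iff_ne_zero.mpr (Nat.factorial_ne_zero k)

lemma rfFact_mono {j k : Nat} (h : j ≤ k) : rfFact j ≤ rfFact k := by
  unfold rfFact; exact_mod_cast Nat.factorial_le h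

lemma rfFact_strict {j k : Nat} (hj : 1 ≤ j) (h : j < k) : rfFact j < rfFact k := by
  unfold rfFact; exact_mod_cast (Nat.factorial_lt hj).mpr h

lemma rfFact13 : rfFact 13 = 6227020800 := by norm_num [rfFact, Nat.factorial]

lemma rfFact_self_le (k : Nat) : (k : Int) ≤ rfFact k := by
  unfold rfFact; exact_mod_cast Nat.self_le_factorial k

lemma rfFact_inj {a b : Nat} (ha : 1 ≤ a) (hb : 1 ≤ b) (h : rfFact a = rfFact b) : a = b := by
  rcases lt_trichotomy a b with hl | he | hg
  · exact absurd h (ne_of_lt (rfFact_strict ha hl))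
  · exact he
  · exact absurd h.symm (ne_of_lt (rfFact_strict hb hg))

lemma rfFact_lt_reflect {a b : Nat} (h : rfFact a < rfFact b) : a < b := by
  by_contra hc
  push_neg at hc
  exact absurd (rfFact_mono hc) (not_le.mpr h)

lemma rfFact_succ (k : Nat) : rfFact (k + 1) = rfFact k * ((k : Int) + 1) := by
  unfold rfFact; rw [Nat.factorial_succ]; push_cast; ring

-- the A-loop step: last = (i-1)! implies last * i = i!
lemma rfStep (last i : Int) (hi : 1 ≤ i) (h : last = rfFact (i - 1).toNat) :
    last * i = rfFact i.toNat := by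
  have h1 : i.toNat = (i - 1).toNat + 1 := by omega
  rw [h, h1, rfFact_succ]
  have h2 : (((i - 1).toNat : Int)) = i - 1 := Int.toNat_of_nonneg (by omega)
  rw [h2]; ring

-- A's loop returns "None" when no factorial (index ≥ 1) equals num
lemma LA_none (num : Int) (hnone : ∀ j : Nat, 1 ≤ j → rfFact j ≠ num) :
    ∀ (fuel : Nat) (last i : Int), 1 ≤ i → last = rfFact (i - 1).toNat →
      rfA_loop num fuel last i = "None" := by
  intro fuel
  induction fuel with
  | zero => intro last i _ _; rfl
  | succ fuel ih =>
    intro last i hi hinv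
    rw [rfA_loop]
    by_cases hle : last ≤ num
    · have hstep := rfStep last i hi hinv
      have hne : last * i ≠ num := by
        rw [hstep]; exact hnone i.toNat (by omega)
      rw [if_pos hle, if_neg hne]
      exact ih (last * i) (i + 1) (by omega) (by rw [hstep]; congr 1; omega)
    · rw [if_neg hle]

-- A's loop returns "k !" when num = k!
lemma LA_some (num : Int) (k : Nat) (hk1 : 1 ≤ k) (hkv : rfFact k = num) :
    ∀ (fuel : Nat) (last i : Int), 1 ≤ i → last = rfFact (i - 1).toNat →
      i ≤ (k : Int) → (k : Int) < i + fuel →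
      rfA_loop num fuel last i = PySem.Int.toStr (k : Int) ++ "!" := by
  intro fuel
  induction fuel with
  | zero => intro last i _ _ h1 h2; omega
  | succ fuel ih =>
    intro last i hi hinv hik hfk
    rw [rfA_loop]
    have hstep := rfStep last i hi hinv
    have hle : last ≤ num := by
      rw [hinv, ← hkv]
      exact rfFact_mono (by omega)
    rw [if_pos hle]
    by_cases hik' : i = (k : Int)
    · have hhit : last * i = num := by
        rw [hstep, hik', show ((k : Int)).toNat = k by omega, hkv]
      rw [if_pos hhit, hik']
    · have hltk : i < (k : Int) := lt_of_le_of_ne hik hik'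
      have hne : last * i ≠ num := by
        rw [hstep, ← hkv]
        exact ne_of_lt (rfFact_strict (by omega) (by omega))
      rw [if_neg hne]
      exact ih (last * i) (i + 1) (by omega)
        (by rw [hstep]; congr 1; omega) (by omega) (by omega)

-- B's step facts: from 1 < n and n * i! = k! we get i < k, (i+1) ∣ n, and the quotient facts
lemma rfBstep (n i : Int) (k : Nat) (hn : 1 < n) (hi : 1 ≤ i)
    (hinv : n * rfFact i.toNat = rfFact k) :
    ∃ c : Int, n = (i + 1) * c ∧ 1 ≤ c ∧ c < n ∧ c * rfFact (i + 1).toNat = rfFact k := by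
  have hpos := rfFact_pos i.toNat
  have hik : i.toNat < k := by
    apply rfFact_lt_reflect
    calc rfFact i.toNat < n * rfFact i.toNat := by nlinarith
    _ = rfFact k := hinv
  have hdvd : rfFact (i.toNat + 1) ∣ rfFact k := by
    unfold rfFact
    exact_mod_cast Nat.factorial_dvd_factorial (by omega)
  obtain ⟨c, hc⟩ := hdvd
  have hcast : ((i.toNat : Int)) = i := Int.toNat_of_nonneg (by omega)
  have hsucc : rfFact (i.toNat + 1) = rfFact i.toNat * (i + 1) := by
    rw [rfFact_succ, hcast]
  have hnc : n = (i + 1) * c := by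
    have h1 : n * rfFact i.toNat = rfFact i.toNat * ((i + 1) * c) := by
      rw [hinv, hc, hsucc]; ring
    have h2 : rfFact i.toNat * n = rfFact i.toNat * ((i + 1) * c) := by linarith [h1]
    exact mul_left_cancel₀ (by omega) h2
  have hc1 : 1 ≤ c := by nlinarith
  refine ⟨c, hnc, hc1, by nlinarith, ?_⟩
  have h3 : (i + 1).toNat = i.toNat + 1 := by omega
  calc c * rfFact (i + 1).toNat = rfFact (i.toNat + 1) * c := by rw [h3]; ring
  _ = rfFact k := hc.symm

-- B's invariant implies i! ≤ the target factorial, bounding i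
lemma rfB_i_le (n i : Int) (k : Nat) (hk1 : 1 ≤ k) (hn : 1 ≤ n) (hi : 1 ≤ i)
    (hinv : n * rfFact i.toNat = rfFact k) : i.toNat ≤ k := by
  by_contra hc
  push_neg at hc
  have h1 : rfFact k < rfFact i.toNat := rfFact_strict hk1 hc
  have h2 : rfFact i.toNat ≤ n * rfFact i.toNat := by nlinarith [rfFact_pos i.toNat]
  rw [hinv] at h2
  linarith

-- B's loop returns "None" when no factorial (index ≥ 1) equals num
lemma LB_none (num : Int) (hnone : ∀ j : Nat, 1 ≤ j → rfFact j ≠ num) :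
    ∀ (fuel : Nat) (n i : Int), 1 ≤ n → 1 ≤ i → n * rfFact i.toNat = num →
      rfB_loop fuel n i = "None" := by
  intro fuel
  induction fuel with
  | zero => intro n i _ _ _; rfl
  | succ fuel ih =>
    intro n i hn hi hinv
    rw [rfB_loop]
    by_cases h1 : 1 < n
    · rw [if_pos h1]
      by_cases hmod : PySem.Int.mod n (i + 1) ≠ 0
      · rw [if_pos hmod]
      · rw [if_neg hmod]
        push_neg at hmod
        have hd : (i + 1) ∣ n := (PySem.Int.mod_eq_zero_iff_dvd n (i + 1)).mp hmod
        obtain ⟨c, hc⟩ := hd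
        have hc1 : 1 ≤ c := by nlinarith
        have hfq : PySem.Int.floordiv n (i + 1) = c := by
          rw [hc, PySem.Int.floordiv_eq_ediv_of_pos (by omega),
            Int.mul_ediv_cancel_left _ (by omega)]
        have hcinv : c * rfFact (i + 1).toNat = num := by
          rw [show (i + 1).toNat = i.toNat + 1 by omega, rfFact_succ,
            show ((i.toNat : Int)) = i from Int.toNat_of_nonneg (by omega), ← hinv, hc]
          ring
        rw [hfq]
        exact ih c (i + 1) (by omega) (by omega) hcinv
    · exfalso
      have hn1 : n = 1 := by omega
      apply hnone i.toNat (by omega)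
      rw [← hinv, hn1, one_mul]

-- B's loop returns "k !" when num = k!
lemma LB_some (num : Int) (k : Nat) (hk1 : 1 ≤ k) (hkv : rfFact k = num) :
    ∀ (fuel : Nat) (n i : Int), 1 ≤ n → 1 ≤ i → n * rfFact i.toNat = num →
      (k : Int) < i + fuel →
      rfB_loop fuel n i = PySem.Int.toStr (k : Int) ++ "!" := by
  intro fuel
  induction fuel with
  | zero =>
    intro n i hn hi hinv hfk
    have := rfB_i_le n i k hk1 hn hi (by rw [hinv, hkv])
    omega
  | succ fuel ih =>
    intro n i hn hi hinv hfk
    rw [rfB_loop]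
    by_cases h1 : 1 < n
    · rw [if_pos h1]
      obtain ⟨c, hnc, hc1, hclt, hcinv⟩ :=
        rfBstep n i k h1 hi (by rw [hinv, hkv])
      have hmod : PySem.Int.mod n (i + 1) = 0 :=
        (PySem.Int.mod_eq_zero_iff_dvd n (i + 1)).mpr ⟨c, hnc⟩
      rw [if_neg (by simp [hmod])]
      have hfq : PySem.Int.floordiv n (i + 1) = c := by
        rw [hnc, PySem.Int.floordiv_eq_ediv_of_pos (by omega),
          Int.mul_ediv_cancel_left _ (by omega)]
      rw [hfq]
      exact ih c (i + 1) (by omega) (by omega) (by rw [hcinv, hkv]) (by omega)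
    · rw [if_neg h1]
      have hn1 : n = 1 := by omega
      have hik : i.toNat = k := by
        apply rfFact_inj (by omega) hk1
        rw [hkv, ← hinv, hn1, one_mul]
      have : i = (k : Int) := by omega
      rw [this]

-- ===== VERDICT (by name: the statement is the Claim_ definition above) =====
theorem reverse_factorial_ok_spec : Claim_equal_reverse_factorial_ok := by
  intro num hdom
  unfold Spec_reverse_factorial_ok reverse_factorial_ok reverse_factorial_ok_alt
  have hbound : num ≤ 2147483648 := by
    have h := hdom
    simp only [Dom_reverse_factorial_ok, pvDomInt, decide_eq_true_eq] at h
    exact h.2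
  have hnum13 : num < rfFact 13 := by rw [rfFact13]; omega
  by_cases hex : ∃ k : Nat, k < 13 ∧ 1 ≤ k ∧ rfFact k = num
  · obtain ⟨k, hk13, hk1, hkv⟩ := hex
    have hnum1 : 1 ≤ num := by rw [← hkv]; exact rfFact_pos k
    have hkle : (k : Int) ≤ num := by rw [← hkv]; exact rfFact_self_le k
    rw [if_neg (by omega : ¬ num < 1)]
    rw [LA_some num k hk1 hkv (num.toNat + 2) 1 1 (le_refl 1)
      (by norm_num [rfFact, Nat.factorial]) (by exact_mod_cast hk1) (by omega)]
    rw [LB_some num k hk1 hkv (num.toNat + 1) num 1 (by omega) (le_refl 1)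
      (by norm_num [rfFact, Nat.factorial]) (by omega)]
  · push_neg at hex
    have hnone : ∀ j : Nat, 1 ≤ j → rfFact j ≠ num := by
      intro j hj
      by_cases hj13 : j < 13
      · exact hex j hj13 hj
      · have := rfFact_mono (show 13 ≤ j by omega)
        intro h; rw [← h] at hnum13; linarith
    rw [LA_none num hnone (num.toNat + 2) 1 1 (le_refl 1)
      (by norm_num [rfFact, Nat.factorial])]
    by_cases hlt : num < 1
    · rw [if_pos hlt]
    · rw [if_neg hlt]
      rw [LB_none num hnone (num.toNat + 1) num 1 (by omega) (le_refl 1)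
        (by norm_num [rfFact, Nat.factorial])]
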